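-- pv_equiv track=rewrite | github.com/Abinesh-repo/PythonPuzzles | bostonpython_poetry.py | find_all_riddles
-- ===== SOURCE A (Python) =====
-- def find_all_riddles(dict_words, text):
--     riddle_4_word = []
--     for t in text:
--         if t not in dict_words.keys():
--             return None
--         else:
--             riddle_4_word.append(dict_words[t])
--     return riddle_4_word
-- ===== SOURCE B (Python) =====
-- def find_all_riddles(dict_words, text):
--     # Stage 1: validate the whole text up front; Stage 2: translate it.
--     if all(t in dict_words for t in text):
--         return [dict_words[t] for t in text]
--     return None
-- ===== Notes on version B (the rewrite author's own statement) =====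
-- stated objective: simpler
-- what changed: Replaces A's single pass with per-token early return and an explicit accumulator by a staged check-then-map: one pass validates that every token is a key, a second pass translates, with no accumulator or early return.
import Mathlib
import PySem

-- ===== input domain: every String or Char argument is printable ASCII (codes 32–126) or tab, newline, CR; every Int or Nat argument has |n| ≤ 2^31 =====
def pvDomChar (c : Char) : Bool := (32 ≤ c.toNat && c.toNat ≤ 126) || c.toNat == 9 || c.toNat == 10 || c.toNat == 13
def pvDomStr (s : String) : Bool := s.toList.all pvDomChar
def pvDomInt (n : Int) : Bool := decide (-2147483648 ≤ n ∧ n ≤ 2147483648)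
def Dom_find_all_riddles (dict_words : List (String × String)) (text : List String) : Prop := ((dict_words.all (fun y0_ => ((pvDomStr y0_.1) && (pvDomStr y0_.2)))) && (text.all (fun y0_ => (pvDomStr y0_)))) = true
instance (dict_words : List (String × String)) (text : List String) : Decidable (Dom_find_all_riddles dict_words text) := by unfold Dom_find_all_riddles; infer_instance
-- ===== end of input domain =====

-- B replaces A's one pass with early return and an accumulator by a staged
-- check-then-map (validate all tokens, then translate); return value only.

-- ===== PORT A =====
-- A's for-loop with early 'return None' and the growing list riddle_4_word;
-- 't not in dict_words.keys()' / 'dict_words[t]' = first-match lookup PySem.Dict.get?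
def find_all_riddles_go (dict_words : List (String × String)) : List String → List String → Option (List String)
  | [], riddle_4_word => some riddle_4_word
  | t :: rest, riddle_4_word =>
      match (PySem.Dict.mk dict_words).get? t with
      | none => none
      | some v => find_all_riddles_go dict_words rest (riddle_4_word ++ [v])

def find_all_riddles (dict_words : List (String × String)) (text : List String) : Option (List String) :=
  find_all_riddles_go dict_words text []

-- ===== PORT B =====
-- Stage 1: all(t in dict_words for t in text); Stage 2: [dict_words[t] for t in text]
-- (the lookup cannot raise after stage 1, so .getD "" is only a totality default)
def find_all_riddles_alt (dict_words : List (String × String)) (text : List String) : Option (List String) :=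
  if text.all (fun t => ((PySem.Dict.mk dict_words).get? t).isSome) then
    some (text.map (fun t => ((PySem.Dict.mk dict_words).get? t).getD ""))
  else none

-- ===== PRECONDITION & SPEC =====
def Spec_find_all_riddles (dict_words : List (String × String)) (text : List String) (out : Option (List String)) : Prop := out = find_all_riddles_alt dict_words text
instance (dict_words : List (String × String)) (text : List String) (out : Option (List String)) : Decidable (Spec_find_all_riddles dict_words text out) := by unfold Spec_find_all_riddles; infer_instance

-- ===== CLAIM (what is proved, stated in full; the proofs are below) =====
def Claim_equal_find_all_riddles : Prop := ∀ (dict_words : List (String × String)) (text : List String), Dom_find_all_riddles dict_words text → Spec_find_all_riddles dict_words text (find_all_riddles dict_words text)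

-- ===== LEMMAS AND PROOFS =====
theorem find_all_riddles_go_eq (dict_words : List (String × String)) (text : List String) :
    ∀ acc : List String, find_all_riddles_go dict_words text acc =
      (find_all_riddles_alt dict_words text).map (fun l => acc ++ l) := by
  induction text with
  | nil => intro acc; simp [find_all_riddles_go, find_all_riddles_alt]
  | cons t rest ih =>
      intro acc
      simp only [find_all_riddles_go]
      cases h : (PySem.Dict.mk dict_words).get? t with
      | none => simp [find_all_riddles_alt, h]
      | some v =>
          show find_all_riddles_go dict_words rest (acc ++ [v]) = _
          rw [ih]
          by_cases hall : rest.all (fun u => ((PySem.Dict.mk dict_words).get? u).isSome)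
          · simp [find_all_riddles_alt, h, hall]
          · simp [find_all_riddles_alt, h, hall]

-- ===== VERDICT (by name: the statement is the Claim_ definition above) =====
theorem find_all_riddles_spec : Claim_equal_find_all_riddles := by
  intro dict_words text _
  unfold Spec_find_all_riddles find_all_riddles
  rw [find_all_riddles_go_eq]
  cases find_all_riddles_alt dict_words text <;> simp
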